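-- pv_equiv track=rewrite | github.com/Tomayhawk/inbox-manager | database.py | _parse_gmail_labels
-- ===== SOURCE A (Python) =====
-- def _parse_gmail_labels(labels_str):
--     # Default State
--     folder = 'all'
--     category = 'primary'
--     is_starred = 0
--     is_read = 1
--
--     if not labels_str:
--         return folder, category, is_starred, is_read
--
--     labels = [l.strip() for l in labels_str.split(',')]
--
--     # 1. Folders
--     if 'Inbox' in labels: folder = 'inbox'
--     elif 'Sent' in labels: folder = 'sent'
--     elif 'Trash' in labels: folder = 'bin'
--     elif 'Spam' in labels: folder = 'spam'
--     elif 'Drafts' in labels: folder = 'drafts'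
--     elif 'Important' in labels: folder = 'important'
--     elif 'Starred' in labels: folder = 'starred'
--
--     # 2. Categories
--     # Gmail categories are mutually exclusive in UI, but labels might overlap.
--     # Priority: Promo > Social > Updates > Forums > Purchases > Primary
--     if 'Category Promotions' in labels: category = 'promotions'
--     elif 'Category Social' in labels: category = 'social'
--     elif 'Category Updates' in labels: category = 'updates'
--     elif 'Category Forums' in labels: category = 'forums'
--     elif 'Category Purchases' in labels: category = 'purchases'
--     else: category = 'primary'
--
--     # 3. Flags
--     if 'Starred' in labels: is_starred = 1
--     if 'Unread' in labels: is_read = 0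
--
--     return folder, category, is_starred, is_read
-- ===== SOURCE B (Python) =====
-- _FOLDER_RANK = {'Inbox': 0, 'Sent': 1, 'Trash': 2, 'Spam': 3,
--                 'Drafts': 4, 'Important': 5, 'Starred': 6}
-- _FOLDER_NAMES = ['inbox', 'sent', 'bin', 'spam', 'drafts', 'important', 'starred', 'all']
-- _CATEGORY_RANK = {'Category Promotions': 0, 'Category Social': 1, 'Category Updates': 2,
--                   'Category Forums': 3, 'Category Purchases': 4}
-- _CATEGORY_NAMES = ['promotions', 'social', 'updates', 'forums', 'purchases', 'primary']
--
-- def _parse_gmail_labels(labels_str):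
--     if not labels_str:
--         return 'all', 'primary', 0, 1
--     # Single pass: keep the best (lowest) priority rank seen so far for folder
--     # and category, plus the two flags; decode the ranks at the end.
--     fr, cr, starred, read = 7, 5, 0, 1
--     for part in labels_str.split(','):
--         l = part.strip()
--         r = _FOLDER_RANK.get(l, 7)
--         if r < fr:
--             fr = r
--         c = _CATEGORY_RANK.get(l, 5)
--         if c < cr:
--             cr = c
--         if l == 'Starred':
--             starred = 1
--         elif l == 'Unread':
--             read = 0
--     return _FOLDER_NAMES[fr], _CATEGORY_NAMES[cr], starred, read
-- ===== Notes on version B (the rewrite author's own statement) =====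
-- stated objective: alternative
-- what changed: Replaces A's two elif chains of membership scans over the label list with a single pass over the split labels that accumulates the lowest-seen folder/category priority ranks (decoded from a name table at the end) and the two flags.
import Mathlib
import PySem

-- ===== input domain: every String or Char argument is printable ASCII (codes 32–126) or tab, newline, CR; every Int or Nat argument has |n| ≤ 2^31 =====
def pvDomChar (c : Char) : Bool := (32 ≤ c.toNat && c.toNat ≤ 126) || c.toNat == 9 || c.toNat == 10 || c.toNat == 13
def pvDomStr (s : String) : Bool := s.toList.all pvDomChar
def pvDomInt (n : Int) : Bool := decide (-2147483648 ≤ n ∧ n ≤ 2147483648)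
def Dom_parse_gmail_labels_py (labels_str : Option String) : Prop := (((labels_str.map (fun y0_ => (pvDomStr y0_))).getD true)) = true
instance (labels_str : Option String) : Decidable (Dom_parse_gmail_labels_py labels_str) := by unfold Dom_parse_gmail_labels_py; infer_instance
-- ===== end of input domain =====

-- B replaces A's two elif membership chains by a single pass over the split labels that keeps
-- the lowest priority rank seen so far for folder and category plus the two flags (alternative decomposition).

-- ===== PORT A =====
-- Transliteration of A: defaults, early return on falsy input, split+strip, two elif chains, flags.
def parse_gmail_labels_py (labels_str : Option String) : String × String × Int × Int :=
  let folder := "all"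
  let category := "primary"
  let is_starred : Int := 0
  let is_read : Int := 1
  match labels_str with
  | none => (folder, category, is_starred, is_read)
  | some s =>
    if s = "" then (folder, category, is_starred, is_read)
    else
      let labels := ((PySem.Str.split? s ",").getD []).map PySem.Str.strip
      let folder :=
        if labels.contains "Inbox" then "inbox"
        else if labels.contains "Sent" then "sent"
        else if labels.contains "Trash" then "bin"
        else if labels.contains "Spam" then "spam"
        else if labels.contains "Drafts" then "drafts"
        else if labels.contains "Important" then "important"
        else if labels.contains "Starred" then "starred"
        else folder
      let category :=
        if labels.contains "Category Promotions" then "promotions"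
        else if labels.contains "Category Social" then "social"
        else if labels.contains "Category Updates" then "updates"
        else if labels.contains "Category Forums" then "forums"
        else if labels.contains "Category Purchases" then "purchases"
        else "primary"
      let is_starred := if labels.contains "Starred" then (1 : Int) else is_starred
      let is_read := if labels.contains "Unread" then (0 : Int) else is_read
      (folder, category, is_starred, is_read)

-- ===== PORT B =====
-- Source B's dicts _FOLDER_RANK/_CATEGORY_RANK as association lists; pvRankGet is dict.get(l, default)
-- (first-match lookup, exact here since the literal keys are distinct).
def pvFolderRank : List (String × Nat) :=
  [("Inbox", 0), ("Sent", 1), ("Trash", 2), ("Spam", 3), ("Drafts", 4), ("Important", 5), ("Starred", 6)]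
def pvCategoryRank : List (String × Nat) :=
  [("Category Promotions", 0), ("Category Social", 1), ("Category Updates", 2),
   ("Category Forums", 3), ("Category Purchases", 4)]
def pvRankGet (tbl : List (String × Nat)) (l : String) (dflt : Nat) : Nat :=
  ((tbl.find? (fun p => p.1 == l)).map Prod.snd).getD dflt

def pvFrank (l : String) : Nat := pvRankGet pvFolderRank l 7
def pvCrank (l : String) : Nat := pvRankGet pvCategoryRank l 5

def pvFolderNames : List String :=
  ["inbox", "sent", "bin", "spam", "drafts", "important", "starred", "all"]
def pvCategoryNames : List String :=
  ["promotions", "social", "updates", "forums", "purchases", "primary"]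

-- one loop-body step of Source B over the state (fr, cr, starred, read)
def pvStep (st : Nat × Nat × Int × Int) (part : String) : Nat × Nat × Int × Int :=
  let l := PySem.Str.strip part
  let r := pvFrank l
  let fr := if r < st.1 then r else st.1
  let c := pvCrank l
  let cr := if c < st.2.1 then c else st.2.1
  let starred := if l = "Starred" then (1 : Int) else st.2.2.1
  let read := if l ≠ "Starred" ∧ l = "Unread" then (0 : Int) else st.2.2.2
  (fr, cr, starred, read)

def parse_gmail_labels_py_alt (labels_str : Option String) : String × String × Int × Int :=
  match labels_str with
  | none => ("all", "primary", 0, 1)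
  | some s =>
    if s = "" then ("all", "primary", 0, 1)
    else
      let st := ((PySem.Str.split? s ",").getD []).foldl pvStep (7, 5, 0, 1)
      -- _FOLDER_NAMES[fr] / _CATEGORY_NAMES[cr]: plain list indexing, always in range (fr ≤ 7, cr ≤ 5)
      (pvFolderNames.getD st.1 "", pvCategoryNames.getD st.2.1 "", st.2.2.1, st.2.2.2)

-- ===== PRECONDITION & SPEC =====
def Spec_parse_gmail_labels_py (labels_str : Option String) (out : String × String × Int × Int) : Prop := out = parse_gmail_labels_py_alt labels_str
instance (labels_str : Option String) (out : String × String × Int × Int) : Decidable (Spec_parse_gmail_labels_py labels_str out) := by unfold Spec_parse_gmail_labels_py; infer_instance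

-- ===== CLAIM (what is proved, stated in full; the proofs are below) =====
def Claim_equal_parse_gmail_labels_py : Prop := ∀ (labels_str : Option String), Dom_parse_gmail_labels_py labels_str → Spec_parse_gmail_labels_py labels_str (parse_gmail_labels_py labels_str)

-- ===== LEMMAS AND PROOFS =====
theorem pvFrank_get (l : String) :
    pvFrank l =
      (if l = "Inbox" then 0 else if l = "Sent" then 1 else if l = "Trash" then 2
       else if l = "Spam" then 3 else if l = "Drafts" then 4 else if l = "Important" then 5
       else if l = "Starred" then 6 else 7) := by
  simp only [pvFrank, pvRankGet, pvFolderRank, List.find?]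
  repeat' split <;> simp_all [eq_comm (b := l)]

theorem pvCrank_get (l : String) :
    pvCrank l =
      (if l = "Category Promotions" then 0 else if l = "Category Social" then 1
       else if l = "Category Updates" then 2 else if l = "Category Forums" then 3
       else if l = "Category Purchases" then 4 else 5) := by
  simp only [pvCrank, pvRankGet, pvCategoryRank, List.find?]
  repeat' split <;> simp_all [eq_comm (b := l)]

theorem pvFrank_le (l : String) : pvFrank l ≤ 7 := by
  rw [pvFrank_get]; split_ifs <;> omega
theorem pvCrank_le (l : String) : pvCrank l ≤ 5 := by
  rw [pvCrank_get]; split_ifs <;> omega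

def pvNChainF (rs : List Nat) : Nat :=
  if rs.contains 0 then 0 else if rs.contains 1 then 1 else if rs.contains 2 then 2 else if rs.contains 3 then 3 else if rs.contains 4 then 4 else if rs.contains 5 then 5 else if rs.contains 6 then 6 else 7
def pvNChainC (rs : List Nat) : Nat :=
  if rs.contains 0 then 0 else if rs.contains 1 then 1 else if rs.contains 2 then 2 else if rs.contains 3 then 3 else if rs.contains 4 then 4 else 5

theorem nchainF_cons (r : Nat) (rs : List Nat) (h : r ≤ 7) :
    min r (pvNChainF rs) = pvNChainF (r :: rs) := by
  interval_cases r <;> simp only [pvNChainF, List.contains_cons] <;> norm_num <;>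
    split_ifs <;> omega

theorem nchainC_cons (r : Nat) (rs : List Nat) (h : r ≤ 5) :
    min r (pvNChainC rs) = pvNChainC (r :: rs) := by
  interval_cases r <;> simp only [pvNChainC, List.contains_cons] <;> norm_num <;>
    split_ifs <;> omega

theorem pvBridgeF0 (ls : List String) :
    ls.contains "Inbox" = (ls.map pvFrank).contains 0 := by
  induction ls with
  | nil => rfl
  | cons l ls ih =>
    simp only [List.map_cons, List.contains_cons, ih]
    congr 1
    rw [pvFrank_get]
    split_ifs <;> simp_all [eq_comm (b := l)]

theorem pvBridgeF1 (ls : List String) :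
    ls.contains "Sent" = (ls.map pvFrank).contains 1 := by
  induction ls with
  | nil => rfl
  | cons l ls ih =>
    simp only [List.map_cons, List.contains_cons, ih]
    congr 1
    rw [pvFrank_get]
    split_ifs <;> simp_all [eq_comm (b := l)]

theorem pvBridgeF2 (ls : List String) :
    ls.contains "Trash" = (ls.map pvFrank).contains 2 := by
  induction ls with
  | nil => rfl
  | cons l ls ih =>
    simp only [List.map_cons, List.contains_cons, ih]
    congr 1
    rw [pvFrank_get]
    split_ifs <;> simp_all [eq_comm (b := l)]

theorem pvBridgeF3 (ls : List String) :
    ls.contains "Spam" = (ls.map pvFrank).contains 3 := by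
  induction ls with
  | nil => rfl
  | cons l ls ih =>
    simp only [List.map_cons, List.contains_cons, ih]
    congr 1
    rw [pvFrank_get]
    split_ifs <;> simp_all [eq_comm (b := l)]

theorem pvBridgeF4 (ls : List String) :
    ls.contains "Drafts" = (ls.map pvFrank).contains 4 := by
  induction ls with
  | nil => rfl
  | cons l ls ih =>
    simp only [List.map_cons, List.contains_cons, ih]
    congr 1
    rw [pvFrank_get]
    split_ifs <;> simp_all [eq_comm (b := l)]

theorem pvBridgeF5 (ls : List String) :
    ls.contains "Important" = (ls.map pvFrank).contains 5 := by
  induction ls with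
  | nil => rfl
  | cons l ls ih =>
    simp only [List.map_cons, List.contains_cons, ih]
    congr 1
    rw [pvFrank_get]
    split_ifs <;> simp_all [eq_comm (b := l)]

theorem pvBridgeF6 (ls : List String) :
    ls.contains "Starred" = (ls.map pvFrank).contains 6 := by
  induction ls with
  | nil => rfl
  | cons l ls ih =>
    simp only [List.map_cons, List.contains_cons, ih]
    congr 1
    rw [pvFrank_get]
    split_ifs <;> simp_all [eq_comm (b := l)]

theorem pvBridgeC0 (ls : List String) :
    ls.contains "Category Promotions" = (ls.map pvCrank).contains 0 := by
  induction ls with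
  | nil => rfl
  | cons l ls ih =>
    simp only [List.map_cons, List.contains_cons, ih]
    congr 1
    rw [pvCrank_get]
    split_ifs <;> simp_all [eq_comm (b := l)]

theorem pvBridgeC1 (ls : List String) :
    ls.contains "Category Social" = (ls.map pvCrank).contains 1 := by
  induction ls with
  | nil => rfl
  | cons l ls ih =>
    simp only [List.map_cons, List.contains_cons, ih]
    congr 1
    rw [pvCrank_get]
    split_ifs <;> simp_all [eq_comm (b := l)]

theorem pvBridgeC2 (ls : List String) :
    ls.contains "Category Updates" = (ls.map pvCrank).contains 2 := by
  induction ls with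
  | nil => rfl
  | cons l ls ih =>
    simp only [List.map_cons, List.contains_cons, ih]
    congr 1
    rw [pvCrank_get]
    split_ifs <;> simp_all [eq_comm (b := l)]

theorem pvBridgeC3 (ls : List String) :
    ls.contains "Category Forums" = (ls.map pvCrank).contains 3 := by
  induction ls with
  | nil => rfl
  | cons l ls ih =>
    simp only [List.map_cons, List.contains_cons, ih]
    congr 1
    rw [pvCrank_get]
    split_ifs <;> simp_all [eq_comm (b := l)]

theorem pvBridgeC4 (ls : List String) :
    ls.contains "Category Purchases" = (ls.map pvCrank).contains 4 := by
  induction ls with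
  | nil => rfl
  | cons l ls ih =>
    simp only [List.map_cons, List.contains_cons, ih]
    congr 1
    rw [pvCrank_get]
    split_ifs <;> simp_all [eq_comm (b := l)]

def pvFChain (ls : List String) : Nat :=
  if ls.contains "Inbox" then 0 else if ls.contains "Sent" then 1
  else if ls.contains "Trash" then 2 else if ls.contains "Spam" then 3
  else if ls.contains "Drafts" then 4 else if ls.contains "Important" then 5
  else if ls.contains "Starred" then 6 else 7

def pvCChain (ls : List String) : Nat :=
  if ls.contains "Category Promotions" then 0 else if ls.contains "Category Social" then 1
  else if ls.contains "Category Updates" then 2 else if ls.contains "Category Forums" then 3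
  else if ls.contains "Category Purchases" then 4 else 5

theorem fchain_eq (ls : List String) : pvFChain ls = pvNChainF (ls.map pvFrank) := by
  simp only [pvFChain, pvNChainF, pvBridgeF0, pvBridgeF1, pvBridgeF2, pvBridgeF3,
    pvBridgeF4, pvBridgeF5, pvBridgeF6]

theorem cchain_eq (ls : List String) : pvCChain ls = pvNChainC (ls.map pvCrank) := by
  simp only [pvCChain, pvNChainC, pvBridgeC0, pvBridgeC1, pvBridgeC2, pvBridgeC3, pvBridgeC4]

theorem fchain_cons (l : String) (ls : List String) :
    min (pvFrank l) (pvFChain ls) = pvFChain (l :: ls) := by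
  rw [fchain_eq, fchain_eq, List.map_cons, ← nchainF_cons _ _ (pvFrank_le l)]

theorem cchain_cons (l : String) (ls : List String) :
    min (pvCrank l) (pvCChain ls) = pvCChain (l :: ls) := by
  rw [cchain_eq, cchain_eq, List.map_cons, ← nchainC_cons _ _ (pvCrank_le l)]

theorem fchain_le (ls : List String) : pvFChain ls ≤ 7 := by
  unfold pvFChain; split_ifs <;> omega
theorem cchain_le (ls : List String) : pvCChain ls ≤ 5 := by
  unfold pvCChain; split_ifs <;> omega

theorem fold_step (parts : List String) (fr cr : Nat) (st rd : Int)
    (hf : fr ≤ 7) (hc : cr ≤ 5) :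
    parts.foldl pvStep (fr, cr, st, rd) =
      (min fr (pvFChain (parts.map PySem.Str.strip)),
       min cr (pvCChain (parts.map PySem.Str.strip)),
       if (parts.map PySem.Str.strip).contains "Starred" then 1 else st,
       if (parts.map PySem.Str.strip).contains "Unread" then 0 else rd) := by
  induction parts generalizing fr cr st rd with
  | nil =>
    simp only [List.foldl_nil, List.map_nil]
    have h1 := fchain_le ([] : List String)
    have h2 := cchain_le ([] : List String)
    simp only [List.contains_nil, if_neg (by simp : ¬(false = true))]
    refine Prod.ext ?_ (Prod.ext ?_ rfl) <;> simp only
    · unfold pvFChain; simp; omega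
    · unfold pvCChain; simp; omega
  | cons p ps ih =>
    simp only [List.foldl_cons, List.map_cons]
    rw [pvStep]
    simp only
    rw [ih _ _ _ _ (by have := pvFrank_le (PySem.Str.strip p); split_ifs <;> omega)
                   (by have := pvCrank_le (PySem.Str.strip p); split_ifs <;> omega)]
    refine Prod.ext ?_ (Prod.ext ?_ (Prod.ext ?_ ?_)) <;> simp only
    · rw [← fchain_cons]
      have := fchain_le (ps.map PySem.Str.strip)
      have := pvFrank_le (PySem.Str.strip p)
      split_ifs <;> omega
    · rw [← cchain_cons]
      have := cchain_le (ps.map PySem.Str.strip)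
      have := pvCrank_le (PySem.Str.strip p)
      split_ifs <;> omega
    · simp only [List.contains_cons, Bool.or_eq_true, beq_iff_eq]
      by_cases h : PySem.Str.strip p = "Starred" <;>
        simp [h, eq_comm (b := PySem.Str.strip p)]
    · simp only [List.contains_cons, Bool.or_eq_true, beq_iff_eq]
      by_cases h : PySem.Str.strip p = "Unread" <;>
        simp_all [eq_comm (b := PySem.Str.strip p)]

-- ===== VERDICT (by name: the statement is the Claim_ definition above) =====
theorem parse_gmail_labels_py_spec : Claim_equal_parse_gmail_labels_py := by
  intro labels_str _
  unfold Spec_parse_gmail_labels_py parse_gmail_labels_py parse_gmail_labels_py_alt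
  cases labels_str with
  | none => rfl
  | some s =>
    by_cases hs : s = ""
    · simp [hs]
    · simp only [hs, if_false]
      rw [fold_step _ _ _ _ _ (by omega) (by omega)]
      set ls := ((PySem.Str.split? s ",").getD []).map PySem.Str.strip with hls
      simp only [Nat.min_eq_right (fchain_le ls), Nat.min_eq_right (cchain_le ls)]
      refine Prod.ext ?_ (Prod.ext ?_ rfl) <;> simp only
      · unfold pvFChain pvFolderNames
        split_ifs <;> rfl
      · unfold pvCChain pvCategoryNames
        split_ifs <;> rfl
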